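-- pv_equiv track=rewrite | github.com/Sharat-Kizhakel/python_practice | AI_LAB/LAB3/iddfs.py | dfs
-- ===== SOURCE A (Python) =====
-- def dfs(src, target, maxDepth, visited_states):
--     if src == target:
--         return True
--     if maxDepth <= 0:
--         return False
--     visited_states.append(src)
--     moves = possible_moves(src, visited_states)
--     for move in moves:
--         if dfs(move, target, maxDepth - 1, visited_states):
--             return True
--     return False
--
-- def gen(src, b, dir):
--     state = src.copy()
--     if dir == 'd':
--         state[b + 3], state[b] = state[b], state[b + 3]
--     if dir == 'u':
--         state[b - 3], state[b] = state[b], state[b - 3]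
--     if dir == 'l':
--         state[b - 1], state[b] = state[b], state[b - 1]
--     if dir == 'r':
--         state[b + 1], state[b] = state[b], state[b + 1]
--     return state
--
-- def possible_moves(src, visited_states):
--
--     d = []
--     b = src.index(-1)
--     if b not in [0, 1, 2]:
--         d.append('u')
--     if b not in [6, 7, 8]:
--         d.append('d')
--     if b not in [0, 3, 6]:
--         d.append('l')
--     if b not in [2, 5, 8]:
--         d.append('r')
--     temp = []
--     for dir in d:
--         temp.append(gen(src, b, dir))
--     return [moves for moves in temp if moves not in visited_states]
-- ===== SOURCE B (Python) =====
-- def dfs(src, target, maxDepth, visited_states):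
--     # Iterative DFS with an explicit LIFO stack of (state, depth) pairs.
--     # Mutates visited_states exactly as the recursive version does.
--     stack = [(src, maxDepth)]
--     while stack:
--         state, depth = stack.pop()
--         if state == target:
--             return True
--         if depth <= 0:
--             continue
--         visited_states.append(state)
--         for move in reversed(possible_moves(state, visited_states)):
--             stack.append((move, depth - 1))
--     return False
--
-- def gen(src, b, dir):
--     state = src.copy()
--     if dir == 'd':
--         state[b + 3], state[b] = state[b], state[b + 3]
--     if dir == 'u':
--         state[b - 3], state[b] = state[b], state[b - 3]
--     if dir == 'l':
--         state[b - 1], state[b] = state[b], state[b - 1]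
--     if dir == 'r':
--         state[b + 1], state[b] = state[b], state[b + 1]
--     return state
--
-- def possible_moves(src, visited_states):
--     d = []
--     b = src.index(-1)
--     if b not in [0, 1, 2]:
--         d.append('u')
--     if b not in [6, 7, 8]:
--         d.append('d')
--     if b not in [0, 3, 6]:
--         d.append('l')
--     if b not in [2, 5, 8]:
--         d.append('r')
--     temp = []
--     for dir in d:
--         temp.append(gen(src, b, dir))
--     return [moves for moves in temp if moves not in visited_states]
-- ===== Notes on version B (the rewrite author's own statement) =====
-- stated objective: alternative
-- what changed: The recursive depth-limited DFS is rewritten iteratively with an explicit LIFO stack of (state, depth) pairs, pushing children in reversed order so the original left-to-right preorder (and the exact mutation order of visited_states) is reproduced without recursion.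
import Mathlib
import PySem

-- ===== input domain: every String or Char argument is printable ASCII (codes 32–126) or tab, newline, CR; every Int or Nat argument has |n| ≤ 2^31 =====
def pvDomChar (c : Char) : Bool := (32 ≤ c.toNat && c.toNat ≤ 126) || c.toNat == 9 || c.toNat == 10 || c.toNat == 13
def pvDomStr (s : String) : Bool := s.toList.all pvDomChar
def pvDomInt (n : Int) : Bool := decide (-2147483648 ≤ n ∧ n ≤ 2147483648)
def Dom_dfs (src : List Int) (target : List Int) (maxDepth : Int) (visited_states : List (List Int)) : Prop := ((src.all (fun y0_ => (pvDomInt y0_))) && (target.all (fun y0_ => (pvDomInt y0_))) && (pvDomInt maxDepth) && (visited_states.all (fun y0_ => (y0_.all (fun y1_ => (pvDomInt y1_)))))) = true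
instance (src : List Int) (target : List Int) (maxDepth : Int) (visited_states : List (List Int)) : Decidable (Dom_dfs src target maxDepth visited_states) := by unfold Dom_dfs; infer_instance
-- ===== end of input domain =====

-- B replaces the recursive depth-limited DFS by an iterative one driven by an explicit
-- LIFO stack of (state, depth) pairs (objective: alternative decomposition, same cost).
-- Both A and B mutate visited_states in the same order; the equivalence proved here is
-- about the return value.


-- ===== PORT A =====
-- gen(src, b, dir): copy and swap; the list indices are in range on every call the
-- guards of possible_moves allow on a valid 9-cell board (Pre_), where this is exact.
def genP (src : List Int) (b : Nat) (dir : Char) : List Int :=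
  let st := src
  let st := if dir = 'd' then (st.set (b + 3) (st.getD b 0)).set b (st.getD (b + 3) 0) else st
  let st := if dir = 'u' then (st.set (b - 3) (st.getD b 0)).set b (st.getD (b - 3) 0) else st
  let st := if dir = 'l' then (st.set (b - 1) (st.getD b 0)).set b (st.getD (b - 1) 0) else st
  let st := if dir = 'r' then (st.set (b + 1) (st.getD b 0)).set b (st.getD (b + 1) 0) else st
  st

-- possible_moves(src, visited_states); src.index(-1) raises ValueError when -1 ∉ src,
-- which Pre_ excludes (the .getD 0 default is never reached inside Pre_).
def possibleMoves (src : List Int) (visited : List (List Int)) : List (List Int) :=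
  let b := (PySem.List.index? src (-1)).getD 0
  let d : List Char :=
    (if ¬ (b = 0 ∨ b = 1 ∨ b = 2) then ['u'] else []) ++
    (if ¬ (b = 6 ∨ b = 7 ∨ b = 8) then ['d'] else []) ++
    (if ¬ (b = 0 ∨ b = 3 ∨ b = 6) then ['l'] else []) ++
    (if ¬ (b = 2 ∨ b = 5 ∨ b = 8) then ['r'] else [])
  let temp := d.map (fun dir => genP src b dir)
  temp.filter (fun m => ¬ visited.contains m)

-- the for-loop over moves of A's dfs: threads the mutated visited list, early-returns
-- on the first successful recursive call (`step` is the recursive call at depth-1)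
def dfsLoopA (step : List Int → List (List Int) → Bool × List (List Int)) :
    List (List Int) → List (List Int) → Bool × List (List Int)
  | [], v => (false, v)
  | m :: ms, v =>
    let r := step m v
    if r.1 then (true, r.2) else dfsLoopA step ms r.2

-- A's recursive dfs; Python mutates visited_states, so the port threads it through
-- (Bool × visited).  The depth counter maxDepth is used only as `<= 0` / `- 1`, so it
-- is carried as the fuel maxDepth.toNat (fuel 0 ↔ maxDepth <= 0), keeping the
-- recursion structural; the branch order of the Python is preserved.
def dfsA : Nat → List Int → List Int → List (List Int) → Bool × List (List Int)
  | 0, src, target, v => if src = target then (true, v) else (false, v)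
  | f + 1, src, target, v =>
    if src = target then (true, v)
    else
      let v' := v ++ [src]
      dfsLoopA (fun m w => dfsA f m target w) (possibleMoves src v') v'

def dfs (src : List Int) (target : List Int) (maxDepth : Int) (visited_states : List (List Int)) : Bool :=
  (dfsA maxDepth.toNat src target visited_states).1

-- ===== PORT B =====
-- termination measure for B's while loop and the two facts its decreasing_by cites
def stackMeasure (stack : List (List Int × Int)) : Nat :=
  (stack.map (fun p => 5 ^ p.2.toNat)).sum

theorem possibleMoves_len_le (src : List Int) (visited : List (List Int)) :
    (possibleMoves src visited).length ≤ 4 := by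
  have hif : ∀ (c : Prop) [Decidable c] (x : Char), (if c then [x] else []).length ≤ 1 := by
    intro c _ x; split <;> simp
  refine le_trans (List.length_filter_le _ _) ?_
  simp only [List.length_map, List.length_append]
  exact Nat.add_le_add (Nat.add_le_add (Nat.add_le_add (hif _ _) (hif _ _)) (hif _ _)) (hif _ _)

theorem stackMeasure_skip (s : List Int) (d : Int) (rest : List (List Int × Int)) :
    stackMeasure rest < stackMeasure ((s, d) :: rest) := by
  simp only [stackMeasure, List.map_cons, List.sum_cons]
  exact Nat.lt_add_of_pos_left (Nat.pow_pos (a := 5) (by decide))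

theorem stackMeasure_expand (l : List (List Int)) (s : List Int) (d : Int)
    (rest : List (List Int × Int)) (hl : l.length ≤ 4) (hd : ¬ d ≤ 0) :
    stackMeasure (l.map (fun m => (m, d - 1)) ++ rest) < stackMeasure ((s, d) :: rest) := by
  simp only [stackMeasure, List.map_cons, List.sum_cons, List.map_append, List.sum_append,
    List.map_map]
  refine Nat.add_lt_add_right ?_ _
  have hsum : ∀ (t : List (List Int)),
      (t.map ((fun p : List Int × Int => 5 ^ p.2.toNat) ∘ fun m => (m, d - 1))).sum
        = t.length * 5 ^ (d - 1).toNat := by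
    intro t
    induction t with
    | nil => simp
    | cons a t ih =>
      simp only [List.map_cons, List.sum_cons, List.length_cons, ih, Function.comp,
        Nat.succ_mul, Nat.add_comm]
  rw [hsum]
  have hdpos : 0 < d := Int.not_le.mp hd
  have h0 : 0 < d.toNat := Int.lt_toNat.mpr hdpos
  have h2 : d.toNat = (d - 1).toNat + 1 := by
    rw [Int.pred_toNat]
    exact (Nat.succ_pred_eq_of_pos h0).symm
  calc l.length * 5 ^ (d - 1).toNat
      ≤ 4 * 5 ^ (d - 1).toNat := Nat.mul_le_mul_right _ hl
    _ < 5 * 5 ^ (d - 1).toNat :=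
        (Nat.mul_lt_mul_right (Nat.pow_pos (a := 5) (by decide))).mpr (by decide)
    _ = 5 ^ (d - 1).toNat * 5 := Nat.mul_comm _ _
    _ = 5 ^ ((d - 1).toNat + 1) := (Nat.pow_succ _ _).symm
    _ = 5 ^ d.toNat := by rw [h2]

-- B's while-loop over the explicit stack (head = top of stack); pushing the reversed
-- children list one by one leaves the children at the top in original order, i.e. the
-- new stack is children ++ rest.
def stackLoop (stack : List (List Int × Int)) (target : List Int) (v : List (List Int)) : Bool :=
  match stack with
  | [] => false
  | (s, d) :: rest =>
    if s = target then true
    else if d ≤ 0 then stackLoop rest target v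
    else
      let v' := v ++ [s]
      stackLoop (((possibleMoves s v').map (fun m => (m, d - 1))) ++ rest) target v'
  termination_by stackMeasure stack
  decreasing_by
  · exact stackMeasure_skip s d rest
  · exact stackMeasure_expand _ s d rest (possibleMoves_len_le s (v ++ [s])) (by assumption)

def dfs_alt (src : List Int) (target : List Int) (maxDepth : Int) (visited_states : List (List Int)) : Bool :=
  stackLoop [(src, maxDepth)] target visited_states

-- ===== PRECONDITION & SPEC =====
-- Pre_ excludes inputs on which Python A raises: when the search actually expands a
-- node (src ≠ target and maxDepth > 0), src.index(-1) raises ValueError if -1 ∉ src,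
-- and gen raises IndexError unless the board has the 9 cells the direction guards
-- assume; both properties are preserved by gen on every generated child state.
def Pre_dfs (src : List Int) (target : List Int) (maxDepth : Int) (visited_states : List (List Int)) : Prop :=
  src = target ∨ maxDepth ≤ 0 ∨ ((-1 : Int) ∈ src ∧ src.length = 9)
instance (src : List Int) (target : List Int) (maxDepth : Int) (visited_states : List (List Int)) : Decidable (Pre_dfs src target maxDepth visited_states) := by unfold Pre_dfs; infer_instance

def pvWitness_dfs : List Int × List Int × Int × List (List Int) :=
  ([1, 2, 3, 4, 5, 6, 7, -1, 8], [1, 2, 3, 4, 5, 6, 7, 8, -1], 2, [])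

def Spec_dfs (src : List Int) (target : List Int) (maxDepth : Int) (visited_states : List (List Int)) (out : Bool) : Prop := out = dfs_alt src target maxDepth visited_states
instance (src : List Int) (target : List Int) (maxDepth : Int) (visited_states : List (List Int)) (out : Bool) : Decidable (Spec_dfs src target maxDepth visited_states out) := by unfold Spec_dfs; infer_instance

-- ===== CLAIM (what is proved, stated in full; the proofs are below) =====
def Claim_equal_dfs : Prop := ∀ (src : List Int) (target : List Int) (maxDepth : Int) (visited_states : List (List Int)), Dom_dfs src target maxDepth visited_states → Pre_dfs src target maxDepth visited_states → Spec_dfs src target maxDepth visited_states (dfs src target maxDepth visited_states)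

-- ===== LEMMAS AND PROOFS =====

-- Simulation: running the stack loop with (s, d) on top is: run the recursive call
-- (at fuel d.toNat), and if it fails continue with the rest of the stack and the
-- updated visited list.
theorem stack_sim (n : Nat) : ∀ (d : Int), d.toNat ≤ n →
    ∀ (s target : List Int) (v : List (List Int)) (rest : List (List Int × Int)),
      stackLoop ((s, d) :: rest) target v =
        (if (dfsA d.toNat s target v).1 then true
         else stackLoop rest target (dfsA d.toNat s target v).2) := by
  induction n with
  | zero =>
    intro d hd s target v rest
    have h0 : d.toNat = 0 := by omega
    have hle : d ≤ 0 := by omega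
    rw [stackLoop, h0, dfsA]
    by_cases h1 : s = target
    · simp [h1]
    · simp [h1, hle]
  | succ n ih =>
    intro d hd s target v rest
    rw [stackLoop]
    by_cases h1 : s = target
    · cases hf : d.toNat with
      | zero => rw [dfsA]; simp [h1]
      | succ f => rw [dfsA]; simp [h1]
    · by_cases h2 : d ≤ 0
      · have h0 : d.toNat = 0 := by omega
        rw [h0, dfsA]
        simp [h1, h2]
      · obtain ⟨f, hf⟩ : ∃ f, d.toNat = f + 1 := ⟨d.toNat - 1, by omega⟩
        have hf1 : (d - 1).toNat = f := by omega
        have hfn : (d - 1).toNat ≤ n := by omega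
        rw [hf, dfsA]
        simp only [h1, h2, if_false]
        -- inner loop simulation, by induction on the moves list
        have loopSim : ∀ (ms : List (List Int)) (v : List (List Int)) (rest : List (List Int × Int)),
            stackLoop ((ms.map (fun m => (m, d - 1))) ++ rest) target v =
              (if (dfsLoopA (fun m w => dfsA f m target w) ms v).1 then true
               else stackLoop rest target (dfsLoopA (fun m w => dfsA f m target w) ms v).2) := by
          intro ms
          induction ms with
          | nil => intro v rest; rw [dfsLoopA]; simp
          | cons m ms ihm =>
            intro v rest
            rw [dfsLoopA]
            simp only [List.map_cons, List.cons_append]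
            rw [ih (d - 1) hfn m target v ((ms.map (fun m => (m, d - 1))) ++ rest), hf1]
            by_cases hb : (dfsA f m target v).1
            · simp [hb]
            · simp only [hb, if_false, Bool.false_eq_true]
              exact ihm (dfsA f m target v).2 rest
        exact loopSim (possibleMoves s (v ++ [s])) (v ++ [s]) rest

-- ===== VERDICT (by name: the statement is the Claim_ definition above) =====
theorem dfs_spec : Claim_equal_dfs := by
  intro src target maxDepth visited_states _ _
  unfold Spec_dfs dfs dfs_alt
  rw [stack_sim maxDepth.toNat maxDepth (le_refl _) src target visited_states []]
  by_cases h : (dfsA maxDepth.toNat src target visited_states).1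
  · simp [h]
  · simp [h, stackLoop]
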